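-- pv_equiv track=rewrite | github.com/alicesilva/P1-Python-Problemas | pre_vogais_funcao.py | pre_vogais
-- ===== SOURCE A (Python) =====
-- def pre_vogais(palavra):
-- 	letras = []
-- 	for i in range(1,len(palavra)):
-- 		if palavra[i] in "AEIOUaeiou":
-- 			if palavra[i-1].lower() in letras:
-- 				break
-- 			else:
-- 				letras.append(palavra[i-1].lower())
--
-- 	return letras
-- ===== SOURCE B (Python) =====
-- def pre_vogais(palavra):
--     # phase 1: all candidate letters (lowercased char preceding a vowel), in order
--     candidatos = [palavra[i-1].lower() for i in range(1, len(palavra)) if palavra[i] in "AEIOUaeiou"]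
--     # phase 2: accumulate until the first already-collected letter
--     resultado = []
--     for c in candidatos:
--         if c in resultado:
--             break
--         resultado.append(c)
--     return resultado
-- ===== Notes on version B (the rewrite author's own statement) =====
-- stated objective: alternative
-- what changed: Two-phase decomposition: a comprehension first builds the full candidate list (lowercased predecessors of vowels), then a separate stop-at-first-repeat pass over that list produces the result, instead of A's single fused index loop.
import Mathlib
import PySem

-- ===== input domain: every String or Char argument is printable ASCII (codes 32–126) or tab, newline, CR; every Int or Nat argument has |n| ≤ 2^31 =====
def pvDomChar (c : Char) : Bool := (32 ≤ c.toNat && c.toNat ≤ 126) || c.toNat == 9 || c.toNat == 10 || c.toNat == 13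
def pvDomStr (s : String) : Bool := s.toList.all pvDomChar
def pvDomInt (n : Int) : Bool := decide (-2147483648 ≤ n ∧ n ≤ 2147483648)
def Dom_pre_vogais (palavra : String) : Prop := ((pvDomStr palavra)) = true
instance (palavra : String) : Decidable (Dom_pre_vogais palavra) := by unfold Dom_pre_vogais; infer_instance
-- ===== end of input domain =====

-- B re-decomposes A's fused loop into candidate generation + a stop-at-first-repeat pass (alternative decomposition, same cost).

-- ===== PORT A =====
-- 'palavra[i] in "AEIOUaeiou"' on a single char = char membership in the vowel list
def vowelsA : List Char := "AEIOUaeiou".toList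

-- the for-loop over range(1, len(palavra)) with state `letras`; `break` returns `letras`
def preVogaisLoopA (palavra : String) : List Int → List String → List String
  | [], letras => letras
  | i :: rest, letras =>
    match PySem.Str.pyGet? palavra i with
    | none => letras   -- unreachable: i taken from range(1, len(palavra))
    | some cur =>
      if cur ∈ vowelsA then
        match PySem.Str.pyGet? palavra (i - 1) with
        | none => letras   -- unreachable likewise
        | some prev =>
          if String.ofList [PySem.Chars.lowerChar prev] ∈ letras then letras
          else preVogaisLoopA palavra rest (letras ++ [String.ofList [PySem.Chars.lowerChar prev]])
      else preVogaisLoopA palavra rest letras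

def pre_vogais (palavra : String) : List String :=
  preVogaisLoopA palavra (PySem.List.pyRange 1 (PySem.Str.len palavra) 1) []

-- ===== PORT B =====
def vowelsB : List Char := "AEIOUaeiou".toList

-- the comprehension body: candidate for index i, if palavra[i] is a vowel
def candAtB (palavra : String) (i : Int) : Option String :=
  match PySem.Str.pyGet? palavra i, PySem.Str.pyGet? palavra (i - 1) with
  | some cur, some prev =>
      if cur ∈ vowelsB then some (String.ofList [PySem.Chars.lowerChar prev]) else none
  | _, _ => none

-- phase 1: candidatos
def candidatosB (palavra : String) : List String :=
  (PySem.List.pyRange 1 (PySem.Str.len palavra) 1).filterMap (candAtB palavra)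

-- phase 2: accumulate until the first repeat
def stopAtRepeatB : List String → List String → List String
  | [], resultado => resultado
  | c :: rest, resultado =>
    if c ∈ resultado then resultado else stopAtRepeatB rest (resultado ++ [c])

def pre_vogais_alt (palavra : String) : List String :=
  stopAtRepeatB (candidatosB palavra) []

-- ===== PRECONDITION & SPEC =====
def Spec_pre_vogais (palavra : String) (out : List String) : Prop := out = pre_vogais_alt palavra
instance (palavra : String) (out : List String) : Decidable (Spec_pre_vogais palavra out) := by unfold Spec_pre_vogais; infer_instance

-- ===== CLAIM (what is proved, stated in full; the proofs are below) =====
def Claim_equal_pre_vogais : Prop := ∀ (palavra : String), Dom_pre_vogais palavra → Spec_pre_vogais palavra (pre_vogais palavra)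

-- ===== LEMMAS AND PROOFS =====

-- A's fused loop equals B's two-phase pass on any index list that stays in range
lemma loopA_eq_loopB (palavra : String) (idxs : List Int)
    (h : ∀ i ∈ idxs, 1 ≤ i ∧ i < (palavra.toList.length : Int)) (letras : List String) :
    preVogaisLoopA palavra idxs letras = stopAtRepeatB (idxs.filterMap (candAtB palavra)) letras := by
  induction idxs generalizing letras with
  | nil => simp [preVogaisLoopA, stopAtRepeatB]
  | cons i rest ih =>
    obtain ⟨h1, h2⟩ := h i (List.mem_cons_self ..)
    have hrest : ∀ j ∈ rest, 1 ≤ j ∧ j < (palavra.toList.length : Int) :=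
      fun j hj => h j (List.mem_cons_of_mem _ hj)
    have hidx : (i - 1).toNat = i.toNat - 1 := by omega
    have hlt : i.toNat < palavra.toList.length := by omega
    have hlt' : i.toNat - 1 < palavra.toList.length := by omega
    have hcur : PySem.Str.pyGet? palavra i = some (palavra.toList[i.toNat]'hlt) := by
      simp only [PySem.Str.pyGet?]
      exact PySem.List.pyGet?_eq_some_getElem _ (by omega) (by omega)
    have hprev : PySem.Str.pyGet? palavra (i - 1) = some (palavra.toList[i.toNat - 1]'hlt') := by
      simp only [PySem.Str.pyGet?]
      have := PySem.List.pyGet?_eq_some_getElem (xs := palavra.toList) (i := i - 1)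
        (by omega) (by omega)
      simpa [hidx] using this
    have hcand : candAtB palavra i =
        if palavra.toList[i.toNat]'hlt ∈ vowelsB then
          some (String.ofList [PySem.Chars.lowerChar (palavra.toList[i.toNat - 1]'hlt')])
        else none := by
      simp only [candAtB, hcur, hprev]
    rw [List.filterMap_cons, hcand]
    simp only [preVogaisLoopA, hcur, hprev]
    by_cases hv : palavra.toList[i.toNat]'hlt ∈ vowelsA
    · have hv2 : palavra.toList[i.toNat]'hlt ∈ vowelsB := hv
      rw [if_pos hv, if_pos hv2]
      by_cases hm : String.ofList [PySem.Chars.lowerChar (palavra.toList[i.toNat - 1]'hlt')] ∈ letras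
      · rw [if_pos hm, stopAtRepeatB, if_pos hm]
      · rw [if_neg hm, stopAtRepeatB, if_neg hm, ih hrest]
    · have hv2 : palavra.toList[i.toNat]'hlt ∉ vowelsB := hv
      rw [if_neg hv, if_neg hv2, ih hrest]

-- ===== VERDICT (by name: the statement is the Claim_ definition above) =====
theorem pre_vogais_spec : Claim_equal_pre_vogais := by
  intro palavra _
  unfold Spec_pre_vogais pre_vogais pre_vogais_alt candidatosB
  apply loopA_eq_loopB
  intro i hi
  have := (PySem.List.mem_pyRange_one).mp hi
  simp only [PySem.Str.len_eq] at this
  omega
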